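-- pv_equiv track=rewrite | github.com/CoolRobotsAndStuff/hito5-42 | Hito 5 Guaridan del clima/SomeIdeasforprelogin.py | has_sequence
-- ===== SOURCE A (Python) =====
-- def has_sequence(password, length=3):
--     for i in range(len(password) - length + 1):
--         chunk = password[i:i+length]
--         codes = [ord(c) for c in chunk]
--         if all(codes[j] + 1 == codes[j+1] for j in range(len(codes)-1)):
--             return True
--         if all(codes[j] - 1 == codes[j+1] for j in range(len(codes)-1)):
--             return True
--     return False
-- ===== SOURCE B (Python) =====
-- def has_sequence(password, length=3):
--     if length <= 1:
--         # a run of length <= 1 exists exactly when the string admits a window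
--         return len(password) >= length
--     codes = [ord(c) for c in password]
--     if not codes:
--         return False
--     prev = codes[0]
--     up = down = 1
--     for o in codes[1:]:
--         up = up + 1 if o == prev + 1 else 1
--         down = down + 1 if o == prev - 1 else 1
--         if up >= length or down >= length:
--             return True
--         prev = o
--     return False
-- ===== Notes on version B (the rewrite author's own statement) =====
-- stated objective: faster
-- what changed: Replaced the sliding-window scan (re-slicing and re-checking a length-sized chunk at every position) by a single left-to-right pass that tracks the current ascending and descending run lengths, answering true as soon as a run reaches the requested length.
import Mathlib
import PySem

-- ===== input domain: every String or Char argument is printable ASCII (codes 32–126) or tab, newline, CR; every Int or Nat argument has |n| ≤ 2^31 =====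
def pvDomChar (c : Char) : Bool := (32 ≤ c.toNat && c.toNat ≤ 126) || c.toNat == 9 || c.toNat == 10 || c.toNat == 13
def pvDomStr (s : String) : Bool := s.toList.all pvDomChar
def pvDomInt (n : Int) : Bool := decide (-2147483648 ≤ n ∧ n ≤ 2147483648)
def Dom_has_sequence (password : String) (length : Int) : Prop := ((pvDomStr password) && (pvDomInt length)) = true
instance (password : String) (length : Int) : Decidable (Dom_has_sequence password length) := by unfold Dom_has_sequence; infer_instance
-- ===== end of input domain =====

-- B replaces A's sliding-window rescans by a single pass tracking the current
-- ascending/descending run lengths; return values are proved equal on all inputs.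

-- ===== PORT A =====

-- ord c (exact: Char is a Unicode scalar value)
def pvOrd (c : Char) : Int := (c.toNat : Int)

-- all(codes[j] + 1 == codes[j+1] for j in range(len(codes)-1))
def pvAllAsc (codes : List Int) : Bool :=
  (List.range (codes.length - 1)).all (fun j => codes.getD j 0 + 1 == codes.getD (j+1) 0)

-- all(codes[j] - 1 == codes[j+1] for j in range(len(codes)-1))
def pvAllDesc (codes : List Int) : Bool :=
  (List.range (codes.length - 1)).all (fun j => codes.getD j 0 - 1 == codes.getD (j+1) 0)

-- the for-loop over range(len(password) - length + 1), with early returns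
def pvALoop (chars : List Char) (length : Int) : List Int → Bool
  | [] => false
  | i :: is =>
    let chunk := PySem.List.slice chars (some i) (some (i + length))
    let codes := chunk.map pvOrd
    if pvAllAsc codes then true
    else if pvAllDesc codes then true
    else pvALoop chars length is

def has_sequence (password : String) (length : Int) : Bool :=
  pvALoop password.toList length
    (PySem.List.pyRange 0 (PySem.Str.len password - length + 1) 1)

-- ===== PORT B =====

-- the for-loop over codes[1:], carrying (prev, up, down) with early return
def pvBLoop (length : Int) : List Int → Int → Int → Int → Bool
  | [], _, _, _ => false
  | o :: rest, prev, up, down =>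
    let up' := if o == prev + 1 then up + 1 else 1
    let down' := if o == prev - 1 then down + 1 else 1
    if up' ≥ length || down' ≥ length then true
    else pvBLoop length rest o up' down'

def has_sequence_alt (password : String) (length : Int) : Bool :=
  if length ≤ 1 then decide ((PySem.Str.len password) ≥ length)
  else
    match password.toList.map pvOrd with
    | [] => false
    | c :: rest => pvBLoop length rest c 1 1

-- ===== PRECONDITION & SPEC =====
def Spec_has_sequence (password : String) (length : Int) (out : Bool) : Prop := out = has_sequence_alt password length
instance (password : String) (length : Int) (out : Bool) : Decidable (Spec_has_sequence password length out) := by unfold Spec_has_sequence; infer_instance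

-- ===== CLAIM (what is proved, stated in full; the proofs are below) =====
def Claim_equal_has_sequence : Prop := ∀ (password : String) (length : Int), Dom_has_sequence password length → Spec_has_sequence password length (has_sequence password length)

-- ===== LEMMAS AND PROOFS =====

-- "the adjacent step is σ everywhere" (σ = 1: ascending, σ = -1: descending)
def chainB (σ : Int) : List Int → Bool
  | [] => true
  | [_] => true
  | a :: b :: t => (a + σ == b) && chainB σ (b :: t)

def goodB (w : List Int) : Bool := chainB 1 w || chainB (-1) w

-- "some length-L window of l satisfies p", structurally
def existsWinP (p : List Int → Bool) (L : Nat) : List Int → Bool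
  | [] => false
  | x :: t => (decide (L ≤ t.length + 1) && p (List.take L (x :: t))) || existsWinP p L t

-- the arithmetic run s, s+σ, s+2σ, … of length k
def gen (σ s : Int) : Nat → List Int
  | 0 => []
  | k+1 => s :: gen σ (s+σ) k

theorem gen_length (σ s : Int) (k : Nat) : (gen σ s k).length = k := by
  induction k generalizing s with
  | zero => rfl
  | succ k ih => simp [gen, ih]

theorem gen_snoc (σ : Int) (k : Nat) (s : Int) (r : List Int) :
    gen σ s k ++ (s + k * σ) :: r = gen σ s (k+1) ++ r := by
  induction k generalizing s with
  | zero => simp [gen]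
  | succ k ih =>
    have : s + (k+1 : Nat) * σ = (s + σ) + (k : Nat) * σ := by push_cast; ring
    simp only [gen, List.cons_append, this, ih]

theorem chainB_gen (σ s : Int) (k : Nat) : chainB σ (gen σ s k) = true := by
  induction k generalizing s with
  | zero => rfl
  | succ k ih =>
    cases k with
    | zero => rfl
    | succ j => simp [gen, chainB] at ih ⊢; exact ih (s+σ)

theorem chainB_force (σ : Int) (j : Nat) (s o : Int) (r : List Int)
    (h : chainB σ (gen σ s (j+1) ++ o :: r) = true) : o = s + (j+1) * σ := by
  induction j generalizing s with
  | zero => simp [gen, chainB] at h; omega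
  | succ j ih =>
    simp only [gen, List.cons_append, chainB, Bool.and_eq_true, beq_iff_eq] at h
    have := ih (s+σ) h.2
    push_cast at this ⊢; linarith

theorem existsWinP_short (p : List Int → Bool) (L : Nat) (l : List Int)
    (h : l.length < L) : existsWinP p L l = false := by
  induction l with
  | nil => rfl
  | cons x t ih =>
    simp only [existsWinP, Bool.or_eq_false_iff]
    refine ⟨by simp only [List.length_cons] at h; simp; omega, ih (by simp at h ⊢; omega)⟩

theorem existsWinP_peel (σ : Int) (L : Nat) : ∀ (k : Nat), k < L → ∀ (s o : Int) (r : List Int),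
    o ≠ s + k * σ →
    existsWinP (chainB σ) L (gen σ s k ++ o :: r) = existsWinP (chainB σ) L (o :: r) := by
  intro k
  induction k with
  | zero => intro _ s o r _; simp [gen]
  | succ j ih =>
    intro hk s o r ho
    have hlist : gen σ s (j+1) ++ o :: r = s :: (gen σ (s+σ) j ++ o :: r) := by simp [gen]
    rw [hlist]
    have hhead : chainB σ (List.take L (s :: (gen σ (s+σ) j ++ o :: r))) = false := by
      by_contra hc
      have hc' : chainB σ (List.take L (s :: (gen σ (s+σ) j ++ o :: r))) = true := by
        cases h' : chainB σ (List.take L (s :: (gen σ (s+σ) j ++ o :: r))) with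
        | false => exact absurd h' hc
        | true => rfl
      have hsh : List.take L (s :: (gen σ (s+σ) j ++ o :: r))
          = gen σ s (j+1) ++ o :: (r.take (L - (j+2))) := by
        rw [← hlist, List.take_append]
        have hg : (gen σ s (j+1)).length = j + 1 := gen_length σ s (j+1)
        rw [List.take_of_length_le (by omega), hg]
        have : L - (j+1) = (L - (j+2)) + 1 := by omega
        rw [this, List.take_succ_cons]
      rw [hsh] at hc'
      exact ho (chainB_force σ j s o _ hc')
    simp only [existsWinP, hhead, Bool.and_false, Bool.false_or]
    exact ih (by omega) (s+σ) o r (by push_cast at ho ⊢; intro h; apply ho; linarith)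

theorem existsWinP_head_true (p : List Int → Bool) (L : Nat) (l : List Int)
    (hlen : L ≤ l.length) (hL : 1 ≤ L) (hp : p (l.take L) = true) : existsWinP p L l = true := by
  cases l with
  | nil => simp at hlen; omega
  | cons x t =>
    simp only [existsWinP, hp, Bool.and_true]
    simp only [List.length_cons] at hlen
    simp [hlen]


theorem bLoop_eq (L : Nat) (hL : 2 ≤ L) :
    ∀ (rest : List Int) (prev : Int) (u d : Nat), 1 ≤ u → u < L → 1 ≤ d → d < L →
      pvBLoop (L : Int) rest prev (u : Int) (d : Int)
        = (existsWinP (chainB 1) L (gen 1 (prev + 1 - u) u ++ rest)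
           || existsWinP (chainB (-1)) L (gen (-1) (prev - 1 + d) d ++ rest)) := by
  intro rest
  induction rest with
  | nil =>
    intro prev u d hu1 huL hd1 hdL
    rw [existsWinP_short _ _ _ (by simp [gen_length]; omega),
        existsWinP_short _ _ _ (by simp [gen_length]; omega)]
    rfl
  | cons o rest' ih =>
    intro prev u d hu1 huL hd1 hdL
    by_cases h1 : o = prev + 1
    · -- ascending extension; o ≠ prev - 1
      have h2 : ¬ (o = prev - 1) := by omega
      have hasc : gen 1 (prev + 1 - u) u ++ o :: rest' = gen 1 (prev + 1 - u) (u+1) ++ rest' := by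
        rw [← gen_snoc]; congr 2; omega
      have hdesc : existsWinP (chainB (-1)) L (gen (-1) (prev - 1 + d) d ++ o :: rest')
          = existsWinP (chainB (-1)) L (o :: rest') := by
        apply existsWinP_peel _ _ _ hdL
        intro hc; apply h2; omega
      by_cases hfull : L ≤ u + 1
      · have hLu : u + 1 = L := by omega
        have hT : pvBLoop (L : Int) (o :: rest') prev (u : Int) (d : Int) = true := by
          simp only [pvBLoop, h1]
          simp
          exact Or.inl (Or.inl (by omega))
        rw [hT, hasc]
        have : existsWinP (chainB 1) L (gen 1 (prev + 1 - u) (u+1) ++ rest') = true := by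
          apply existsWinP_head_true _ _ _ (by simp [gen_length]; omega) (by omega)
          rw [List.take_append, gen_length, List.take_of_length_le (by rw [gen_length]; omega)]
          have : L - (u+1) = 0 := by omega
          rw [this]
          simpa using chainB_gen 1 (prev + 1 - u) (u+1)
        simp [this]
      · -- u + 1 < L : recurse
        have hstep : pvBLoop (L : Int) (o :: rest') prev (u : Int) (d : Int)
            = pvBLoop (L : Int) rest' o ((u : Int) + 1) 1 := by
          have hb1 : ((prev + 1 : Int) == prev + 1) = true := by simp
          have hb2 : ((prev + 1 : Int) == prev - 1) = false := by simp; omega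
          simp only [pvBLoop, h1, hb1, hb2, if_true]
          rw [if_neg (by simp; omega)]
          simp
        have hih := ih o (u+1) 1 (by omega) (by omega) (by omega) (by omega)
        push_cast at hih
        rw [hstep, hih, hdesc]
        congr 2
        · rw [hasc]; congr 2; omega
        · have e : o - 1 + 1 = o := by ring
          simp [gen, e]
    · by_cases h2 : o = prev - 1
      · -- descending extension
        have hdesc : gen (-1) (prev - 1 + d) d ++ o :: rest' = gen (-1) (prev - 1 + d) (d+1) ++ rest' := by
          rw [← gen_snoc]; congr 2; omega
        have hascp : existsWinP (chainB 1) L (gen 1 (prev + 1 - u) u ++ o :: rest')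
            = existsWinP (chainB 1) L (o :: rest') := by
          apply existsWinP_peel _ _ _ huL
          intro hc; apply h1; omega
        by_cases hfull : L ≤ d + 1
        · have hT : pvBLoop (L : Int) (o :: rest') prev (u : Int) (d : Int) = true := by
            simp only [pvBLoop, h2]
            simp
            exact Or.inl (Or.inr (by omega))
          rw [hT, hdesc]
          have : existsWinP (chainB (-1)) L (gen (-1) (prev - 1 + d) (d+1) ++ rest') = true := by
            apply existsWinP_head_true _ _ _ (by simp [gen_length]; omega) (by omega)
            rw [List.take_append, gen_length, List.take_of_length_le (by rw [gen_length]; omega)]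
            have h0 : L - (d+1) = 0 := by omega
            rw [h0]
            have hLd : d + 1 = L := by omega
            simpa using chainB_gen (-1) (prev - 1 + d) (d+1)
          simp [this]
        · have hstep : pvBLoop (L : Int) (o :: rest') prev (u : Int) (d : Int)
              = pvBLoop (L : Int) rest' o 1 ((d : Int) + 1) := by
            have hb2 : (o == prev - 1) = true := by simp [h2]
            have hb1 : (o == prev + 1) = false := by simp; omega
            simp only [pvBLoop, hb1, hb2, if_true]
            rw [if_neg (by simp; omega)]
            simp
          have hih := ih o 1 (d+1) (by omega) (by omega) (by omega) (by omega)
          push_cast at hih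
          rw [hstep, hih, hascp]
          congr 2
          · have e : o + 1 - 1 = o := by ring
            simp [gen, e]
          · rw [hdesc]; congr 2; omega
      · -- reset both
        have hstep : pvBLoop (L : Int) (o :: rest') prev (u : Int) (d : Int)
            = pvBLoop (L : Int) rest' o 1 1 := by
          have hb1 : (o == prev + 1) = false := by simp; omega
          have hb2 : (o == prev - 1) = false := by simp; omega
          simp only [pvBLoop, hb1, hb2]
          rw [if_neg (by simp; omega)]
          simp
        have hih := ih o 1 1 (by omega) (by omega) (by omega) (by omega)
        push_cast at hih
        rw [hstep, hih,
            existsWinP_peel 1 L u huL _ o _ (by omega),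
            existsWinP_peel (-1) L d hdL _ o _ (by omega)]
        have e1 : o + 1 - 1 = o := by ring
        have e2 : o - 1 + 1 = o := by ring
        simp [gen, e1, e2]

theorem pvAllAsc_eq_chainB (w : List Int) : pvAllAsc w = chainB 1 w := by
  induction w with
  | nil => rfl
  | cons a t ih =>
    cases t with
    | nil => rfl
    | cons b t' =>
      simp only [pvAllAsc, chainB, List.length_cons, Nat.add_sub_cancel,
        List.range_succ_eq_map, List.all_cons, List.all_map, ← ih]
      simp only [Function.comp_def, Nat.succ_eq_add_one, List.getD_cons_succ, List.getD_cons_zero]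

theorem pvAllDesc_eq_chainB (w : List Int) : pvAllDesc w = chainB (-1) w := by
  induction w with
  | nil => rfl
  | cons a t ih =>
    cases t with
    | nil => rfl
    | cons b t' =>
      simp only [pvAllDesc, chainB, List.length_cons, Nat.add_sub_cancel,
        List.range_succ_eq_map, List.all_cons, List.all_map, ← ih]
      simp only [Function.comp_def, Nat.succ_eq_add_one, List.getD_cons_succ, List.getD_cons_zero]
      simp [sub_eq_add_neg]


theorem aLoop_eq (chars : List Char) (L : Nat) (hL : 1 ≤ L) :
    ∀ k : Nat, k ≤ chars.length →
      pvALoop chars (L : Int) (PySem.List.pyRange (k : Int) ((chars.length : Int) - (L : Int) + 1) 1)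
        = existsWinP goodB L ((chars.map pvOrd).drop k) := by
  intro k hk
  induction hn : chars.length - k generalizing k with
  | zero =>
    -- k = chars.length case … but also k + anything; here n - k = 0 means k = n
    have hkn : k = chars.length := by omega
    have h1 : ((chars.length : Int) - (L : Int) + 1) ≤ (k : Int) := by omega
    rw [PySem.List.pyRange_one_eq_nil h1, existsWinP_short]
    · rfl
    · simp [hkn]; omega
  | succ m ih =>
    by_cases h : k + L ≤ chars.length
    · have hcons : (k : Int) < (chars.length : Int) - (L : Int) + 1 := by omega
      rw [PySem.List.pyRange_one_cons hcons]
      have hklt : k < chars.length := by omega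
      have hchunk : PySem.List.slice chars (some (k : Int)) (some ((k : Int) + (L : Int)))
          = (chars.drop k).take L := PySem.List.slice_natCast_add chars k L
      have hcodes : ((chars.drop k).take L).map pvOrd = ((chars.map pvOrd).drop k).take L := by
        simp [List.map_take, List.map_drop]
      have hdrop : (chars.map pvOrd).drop k
          = (chars.map pvOrd)[k]'(by simpa using hklt) :: (chars.map pvOrd).drop (k+1) := by
        exact List.drop_eq_getElem_cons (by simpa using hklt)
      have hrec : ((k : Int) + 1) = ((k+1 : Nat) : Int) := by push_cast; ring
      simp only [pvALoop, hchunk, hcodes, hrec, ih (k+1) (by omega) (by omega)]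
      rw [hdrop]
      simp only [existsWinP, pvAllAsc_eq_chainB, pvAllDesc_eq_chainB]
      have hlen : decide (L ≤ ((chars.map pvOrd).drop (k+1)).length + 1) = true := by
        simp; omega
      rw [← hdrop]
      simp only [hlen, Bool.true_and, goodB]
      cases chainB 1 (((chars.map pvOrd).drop k).take L) <;>
        cases chainB (-1) (((chars.map pvOrd).drop k).take L) <;> simp
    · have h1 : ((chars.length : Int) - (L : Int) + 1) ≤ (k : Int) := by omega
      rw [PySem.List.pyRange_one_eq_nil h1, existsWinP_short]
      · rfl
      · simp; omega

theorem existsWinP_or (p q : List Int → Bool) (L : Nat) (l : List Int) :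
    existsWinP (fun w => p w || q w) L l = (existsWinP p L l || existsWinP q L l) := by
  induction l with
  | nil => rfl
  | cons x t ih =>
    simp only [existsWinP, ih, Bool.and_or_distrib_left]
    cases p (List.take L (x :: t)) <;> cases q (List.take L (x :: t)) <;>
      cases existsWinP p L t <;> cases existsWinP q L t <;> simp

theorem pvALoop_any (chars : List Char) (length : Int) (idxs : List Int) :
    pvALoop chars length idxs = idxs.any (fun i =>
      pvAllAsc ((PySem.List.slice chars (some i) (some (i + length))).map pvOrd)
      || pvAllDesc ((PySem.List.slice chars (some i) (some (i + length))).map pvOrd)) := by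
  induction idxs with
  | nil => rfl
  | cons i is ih =>
    simp only [pvALoop, List.any_cons, ih]
    cases pvAllAsc ((PySem.List.slice chars (some i) (some (i + length))).map pvOrd) <;>
      cases pvAllDesc ((PySem.List.slice chars (some i) (some (i + length))).map pvOrd) <;> simp

theorem main_eq (password : String) (length : Int) :
    has_sequence password length = has_sequence_alt password length := by
  unfold has_sequence has_sequence_alt
  simp only [PySem.Str.len_eq]
  by_cases hlen1 : length ≤ 1
  · rw [if_pos hlen1]
    by_cases hge : length ≤ (password.toList.length : Int)
    · rw [pvALoop_any]
      refine Eq.trans ?_ (decide_eq_true (by omega : (password.toList.length : Int) ≥ length)).symm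
      rw [List.any_eq_true]
      by_cases h0 : length ≤ 0
      · refine ⟨(password.toList.length : Int), ?_, ?_⟩
        · rw [PySem.List.mem_pyRange_one]; omega
        · have hnil : PySem.List.slice password.toList (some (password.toList.length : Int))
              (some ((password.toList.length : Int) + length)) = [] := by
            apply List.eq_nil_of_length_eq_zero
            rw [PySem.List.length_slice]
            have h1 : PySem.List.clampIdx password.toList.length (password.toList.length : Int)
                = password.toList.length := by
              rw [PySem.List.clampIdx_natCast]; omega
            have h2 : PySem.List.clampIdx password.toList.length
                ((password.toList.length : Int) + length) ≤ password.toList.length :=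
              PySem.List.clampIdx_le _ _
            omega
          rw [hnil]
          rfl
      · have h1 : length = 1 := by omega
        subst h1
        refine ⟨0, ?_, ?_⟩
        · rw [PySem.List.mem_pyRange_one]; omega
        · have hne : password.toList ≠ [] := by
            intro h; rw [h] at hge; simp at hge
          obtain ⟨c, t, hct⟩ := List.exists_cons_of_ne_nil hne
          have hchunk : PySem.List.slice password.toList (some 0) (some (0 + 1)) = [c] := by
            rw [show ((0 : Int) + 1) = 1 from by ring]
            rw [show ((0 : Int)) = ((0 : Nat) : Int) from rfl,
                show ((1 : Int)) = ((1 : Nat) : Int) from rfl,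
                PySem.List.slice_natCast, hct]
            rfl
          rw [hchunk]
          rfl
    · have hnil : PySem.List.pyRange 0 ((password.toList.length : Int) - length + 1) 1 = [] := by
        apply PySem.List.pyRange_one_eq_nil; omega
      rw [hnil]
      exact (decide_eq_false (by omega : ¬ (password.toList.length : Int) ≥ length)).symm
  · rw [if_neg hlen1]
    have hL2 : 2 ≤ length.toNat := by omega
    have hcast : ((length.toNat : Nat) : Int) = length := Int.toNat_of_nonneg (by omega)
    rw [← hcast]
    have hA := aLoop_eq password.toList length.toNat (by omega) 0 (by omega)
    simp only [Nat.cast_zero, List.drop_zero] at hA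
    rw [hA]
    rw [show goodB = fun w => chainB 1 w || chainB (-1) w from rfl, existsWinP_or]
    cases hc : password.toList.map pvOrd with
    | nil => rfl
    | cons c rest =>
      have hB := bLoop_eq length.toNat hL2 rest c 1 1 (by omega) (by omega) (by omega) (by omega)
      push_cast at hB
      show _ = pvBLoop ((length.toNat : Nat) : Int) rest c 1 1
      rw [hB]
      have e1 : c + 1 - 1 = c := by ring
      have e2 : c - 1 + 1 = c := by ring
      simp [gen, e1, e2]

-- ===== VERDICT (by name: the statement is the Claim_ definition above) =====
theorem has_sequence_spec : Claim_equal_has_sequence := by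
  intro password length _
  unfold Spec_has_sequence
  exact main_eq password length
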